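-- pv_equiv track=rewrite | github.com/Ege-Terzi/Cameratatouille | ui.py | get_visible_step_range
-- ===== SOURCE A (Python) =====
-- def get_visible_step_range(total_steps, current_step_idx, max_visible_steps):
--     # Limit the context window to at most 3 visible steps
--     context_window = min(max_visible_steps, 3)
--
--     # Start by centering the visible range around the current step
--     start_idx = max(0, current_step_idx - 1)
--     end_idx = min(total_steps, current_step_idx + 2)
--
--     # Expand upward if there is still room in the visible window
--     while end_idx - start_idx < context_window and start_idx > 0:
--         start_idx -= 1
--
--     # Expand downward if there is still room in the visible window
--     while end_idx - start_idx < context_window and end_idx < total_steps: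
--         end_idx += 1
--
--     # Return the start and end indices of visible steps
--     return start_idx, end_idx
-- ===== SOURCE B (Python) =====
-- def get_visible_step_range(total_steps, current_step_idx, max_visible_steps):
--     cw = min(max_visible_steps, 3)
--     s0 = max(0, current_step_idx - 1)
--     e0 = min(total_steps, current_step_idx + 2)
--     s = s0 - min(max(cw - (e0 - s0), 0), s0)
--     e = e0 + min(max(cw - (e0 - s), 0), total_steps - e0)
--     return s, e
-- ===== Notes on version B (the rewrite author's own statement) =====
-- stated objective: simpler
-- what changed: Replaced A's two step-by-step while loops with direct capped arithmetic: shift the start down by the deficit capped at s0, then shift the end up by the remaining deficit capped at total_steps - e0.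
import Mathlib
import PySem

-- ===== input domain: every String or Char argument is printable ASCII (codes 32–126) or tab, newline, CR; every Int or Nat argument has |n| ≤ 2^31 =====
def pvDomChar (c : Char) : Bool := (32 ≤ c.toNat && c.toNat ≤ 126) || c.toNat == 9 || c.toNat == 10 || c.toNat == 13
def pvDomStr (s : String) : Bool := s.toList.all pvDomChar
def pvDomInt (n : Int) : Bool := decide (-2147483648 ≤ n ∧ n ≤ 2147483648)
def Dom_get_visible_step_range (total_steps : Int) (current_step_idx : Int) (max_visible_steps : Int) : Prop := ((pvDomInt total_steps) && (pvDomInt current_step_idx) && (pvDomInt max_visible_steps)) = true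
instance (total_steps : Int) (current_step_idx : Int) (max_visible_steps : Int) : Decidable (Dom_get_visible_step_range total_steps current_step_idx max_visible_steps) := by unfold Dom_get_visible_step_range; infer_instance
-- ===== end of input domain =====

-- B replaces A's two step-by-step while loops with direct capped arithmetic (objective: simpler).

-- ===== PORT A =====
-- first while loop of A: decrement start_idx while the window is short and start_idx > 0
def pvLoopStart (end_idx : Int) (context_window : Int) (start_idx : Int) : Int :=
  if end_idx - start_idx < context_window ∧ start_idx > 0 then
    pvLoopStart end_idx context_window (start_idx - 1)
  else start_idx
termination_by start_idx.toNat
decreasing_by omega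

-- second while loop of A: increment end_idx while the window is short and end_idx < total_steps
def pvLoopEnd (total_steps : Int) (start_idx : Int) (context_window : Int) (end_idx : Int) : Int :=
  if end_idx - start_idx < context_window ∧ end_idx < total_steps then
    pvLoopEnd total_steps start_idx context_window (end_idx + 1)
  else end_idx
termination_by (total_steps - end_idx).toNat
decreasing_by omega

def get_visible_step_range (total_steps : Int) (current_step_idx : Int) (max_visible_steps : Int) : Int × Int :=
  let context_window := min max_visible_steps 3
  let start_idx := max 0 (current_step_idx - 1)
  let end_idx := min total_steps (current_step_idx + 2)
  let start_idx := pvLoopStart end_idx context_window start_idx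
  let end_idx := pvLoopEnd total_steps start_idx context_window end_idx
  (start_idx, end_idx)

-- ===== PORT B =====
def get_visible_step_range_alt (total_steps : Int) (current_step_idx : Int) (max_visible_steps : Int) : Int × Int :=
  let cw := min max_visible_steps 3
  let s0 := max 0 (current_step_idx - 1)
  let e0 := min total_steps (current_step_idx + 2)
  let s := s0 - min (max (cw - (e0 - s0)) 0) s0
  let e := e0 + min (max (cw - (e0 - s)) 0) (total_steps - e0)
  (s, e)

-- ===== PRECONDITION & SPEC =====
def Spec_get_visible_step_range (total_steps : Int) (current_step_idx : Int) (max_visible_steps : Int) (out : Int × Int) : Prop := out = get_visible_step_range_alt total_steps current_step_idx max_visible_steps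
instance (total_steps : Int) (current_step_idx : Int) (max_visible_steps : Int) (out : Int × Int) : Decidable (Spec_get_visible_step_range total_steps current_step_idx max_visible_steps out) := by unfold Spec_get_visible_step_range; infer_instance

-- ===== CLAIM (what is proved, stated in full; the proofs are below) =====
def Claim_equal_get_visible_step_range : Prop := ∀ (total_steps : Int) (current_step_idx : Int) (max_visible_steps : Int), Dom_get_visible_step_range total_steps current_step_idx max_visible_steps → Spec_get_visible_step_range total_steps current_step_idx max_visible_steps (get_visible_step_range total_steps current_step_idx max_visible_steps)

-- ===== LEMMAS AND PROOFS =====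

theorem pvLoopStart_closed (e cw : Int) : ∀ s : Int, 0 ≤ s →
    pvLoopStart e cw s = s - min (max (cw - (e - s)) 0) s := by
  intro s hs
  induction s using pvLoopStart.induct e cw with
  | case1 s hc ih =>
      rw [pvLoopStart, if_pos hc, ih (by omega)]
      omega
  | case2 s hc =>
      rw [pvLoopStart, if_neg hc]
      omega

theorem pvLoopEnd_closed (T s cw : Int) : ∀ e : Int, e ≤ T →
    pvLoopEnd T s cw e = e + min (max (cw - (e - s)) 0) (T - e) := by
  intro e he
  induction e using pvLoopEnd.induct T s cw with
  | case1 e hc ih =>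
      rw [pvLoopEnd, if_pos hc, ih (by omega)]
      omega
  | case2 e hc =>
      rw [pvLoopEnd, if_neg hc]
      omega

-- ===== VERDICT (by name: the statement is the Claim_ definition above) =====
theorem get_visible_step_range_spec : Claim_equal_get_visible_step_range := by
  intro T c m _
  unfold Spec_get_visible_step_range get_visible_step_range get_visible_step_range_alt
  dsimp only
  rw [pvLoopStart_closed _ _ _ (by omega), pvLoopEnd_closed _ _ _ _ (by omega)]
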